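-- pv_equiv track=rewrite | github.com/luckykamon/IPT | TD/prof/td07a.py | AllianceMin
-- ===== SOURCE A (Python) =====
-- def AllianceMin(c,Obj):
--   n = len(c)
--   a = [False]*n
--   s = 0
--   k = n-1
--   while s < Obj and k>=0:
--     s = s+ c[k]
--     a[k] = True
--     k = k - 1
--   if s < Obj:
--     raise ValueError
--   return a
-- ===== SOURCE B (Python) =====
-- def AllianceMin(c, Obj):
--     n = len(c)
--     sums = [0]
--     for x in reversed(c):
--         sums.append(sums[-1] + x)
--     m = next((m for m, t in enumerate(sums) if t >= Obj), None)
--     if m is None: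
--         raise ValueError
--     return [i >= n - m for i in range(n)]
-- ===== Notes on version B (the rewrite author's own statement) =====
-- stated objective: alternative
-- what changed: B precomputes the cumulative suffix sums in one pass, picks the least count m whose suffix sum reaches Obj, and builds the mask directly from m, instead of A's single stateful while-loop that mutates the mask while walking backwards.
import Mathlib
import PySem

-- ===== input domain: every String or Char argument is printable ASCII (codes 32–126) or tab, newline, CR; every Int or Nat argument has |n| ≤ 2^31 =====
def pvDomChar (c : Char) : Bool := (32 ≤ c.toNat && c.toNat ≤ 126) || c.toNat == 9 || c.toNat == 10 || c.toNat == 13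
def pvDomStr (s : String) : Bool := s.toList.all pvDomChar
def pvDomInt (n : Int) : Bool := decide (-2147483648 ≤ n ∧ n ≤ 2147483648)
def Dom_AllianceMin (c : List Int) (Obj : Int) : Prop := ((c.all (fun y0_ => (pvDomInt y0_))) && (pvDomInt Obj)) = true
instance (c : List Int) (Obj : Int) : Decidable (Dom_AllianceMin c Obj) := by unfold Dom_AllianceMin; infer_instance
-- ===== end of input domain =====

-- B replaces A's stateful backward while-loop with: cumulative suffix sums, least count m reaching Obj, mask built from m (alternative decomposition, same cost).
-- Pre_ excludes exactly the inputs on which A raises ValueError; B raises there too.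

-- ===== PORT A =====
-- A's while loop; fuel = k+1 where k is A's index (fuel 0 ↔ k = -1, loop ends).
def AllianceMinLoop (c : List Int) (Obj : Int) : Nat → List Bool → Int → List Bool
  | 0, a, _ => a
  | k + 1, a, s =>
    if s < Obj then
      AllianceMinLoop c Obj k (a.set k true) (s + ((PySem.List.pyGet? c (k : Int)).getD 0))
    else a

-- A's trailing 'if s < Obj: raise ValueError' is excluded by Pre_; the port returns a there.
def AllianceMin (c : List Int) (Obj : Int) : List Bool :=
  AllianceMinLoop c Obj c.length (List.replicate c.length false) 0

-- ===== PORT B =====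
-- sums = [0]; for x in reversed(c): sums.append(sums[-1] + x)
def AllianceMinSums (c : List Int) : List Int :=
  c.reverse.foldl (fun acc x => acc ++ [((PySem.List.pyGet? acc (-1)).getD 0) + x]) [0]

def AllianceMin_alt (c : List Int) (Obj : Int) : List Bool :=
  match (AllianceMinSums c).findIdx? (fun t => Obj ≤ t) with
  | none => []   -- raise ValueError (excluded by Pre_)
  | some m => (List.range c.length).map (fun (i : Nat) => decide ((c.length : Int) - (m : Int) ≤ (i : Int)))

-- ===== PRECONDITION & SPEC =====
-- Pre_ excludes exactly the inputs where A raises ValueError: no suffix (possibly empty) of c sums to ≥ Obj.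
def Pre_AllianceMin (c : List Int) (Obj : Int) : Prop :=
  ∃ f, f ≤ c.length ∧ Obj ≤ (c.drop f).sum
instance (c : List Int) (Obj : Int) : Decidable (Pre_AllianceMin c Obj) := by unfold Pre_AllianceMin; infer_instance
def pvWitness_AllianceMin : List Int × Int := ([2, 3, 4], 5)

def Spec_AllianceMin (c : List Int) (Obj : Int) (out : List Bool) : Prop := out = AllianceMin_alt c Obj
instance (c : List Int) (Obj : Int) (out : List Bool) : Decidable (Spec_AllianceMin c Obj out) := by unfold Spec_AllianceMin; infer_instance

-- ===== CLAIM (what is proved, stated in full; the proofs are below) =====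
def Claim_equal_AllianceMin : Prop := ∀ (c : List Int) (Obj : Int), Dom_AllianceMin c Obj → Pre_AllianceMin c Obj → Spec_AllianceMin c Obj (AllianceMin c Obj)

-- ===== LEMMAS AND PROOFS =====

-- the mask marking exactly the indices ≥ f
def maskN (n f : Nat) : List Bool := (List.range n).map (fun i => decide (f ≤ i))

-- reference loop: downward scan over f = start of the remaining suffix
def refLoop (c : List Int) (Obj : Int) : Nat → List Bool
  | 0 => maskN c.length 0
  | f + 1 => if (c.drop (f + 1)).sum < Obj then refLoop c Obj f else maskN c.length (f + 1)

-- running prefix sums starting from s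
def psums (s : Int) : List Int → List Int
  | [] => []
  | x :: xs => (s + x) :: psums (s + x) xs

lemma maskN_set (n f : Nat) (_ : f < n) : (maskN n (f + 1)).set f true = maskN n f := by
  apply List.ext_getElem
  · simp [maskN]
  · intro i hi _
    simp only [maskN, List.getElem_set, List.getElem_map, List.getElem_range]
    simp only [maskN] at hi
    by_cases hfi : f = i
    · subst hfi; simp
    · simp only [hfi, if_false]
      have : (f + 1 ≤ i) ↔ (f ≤ i) := by omega
      simp [this]

lemma maskN_self (n : Nat) : maskN n n = List.replicate n false := by
  apply List.ext_getElem
  · simp [maskN]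
  · intro i hi _
    simp only [maskN, List.length_map, List.length_range] at hi
    simp [maskN, Nat.not_le.mpr hi]

lemma aLoop_eq_ref (xs : List Int) (Obj : Int) :
    ∀ f, f ≤ xs.length →
      AllianceMinLoop xs Obj f (maskN xs.length f) ((xs.drop f).sum) = refLoop xs Obj f := by
  intro f
  induction f with
  | zero => intro _; simp [AllianceMinLoop, refLoop]
  | succ k ih =>
    intro hk
    have hklt : k < xs.length := by omega
    have hget : PySem.List.pyGet? xs (k : Int) = some xs[k] := by
      rw [PySem.List.pyGet?_natCast]
      exact List.getElem?_eq_getElem hklt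
    have hsum : (xs.drop (k + 1)).sum + xs[k] = (xs.drop k).sum := by
      have hcd := List.getElem_cons_drop (as := xs) (i := k)
      rw [← hcd hklt, List.sum_cons]
      ring
    simp only [AllianceMinLoop, refLoop]
    by_cases hlt : (xs.drop (k + 1)).sum < Obj
    · simp only [if_pos hlt, hget, Option.getD_some, maskN_set xs.length k hklt, hsum]
      exact ih (by omega)
    · simp [if_neg hlt]

lemma psums_foldl (l : List Int) : ∀ (acc : List Int) (s : Int), acc.getLast? = some s →
    l.foldl (fun acc x => acc ++ [((PySem.List.pyGet? acc (-1)).getD 0) + x]) acc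
      = acc ++ psums s l := by
  induction l with
  | nil => intro acc _ _; simp [psums]
  | cons x xs ih =>
    intro acc s hlast
    simp only [List.foldl_cons]
    have hx : (PySem.List.pyGet? acc (-1)).getD 0 + x = s + x := by
      rw [PySem.List.pyGet?_neg_one, hlast]
      rfl
    rw [hx, ih (acc ++ [s + x]) (s + x) (by simp)]
    simp [psums]

lemma sums_eq (c : List Int) : AllianceMinSums c = 0 :: psums 0 c.reverse := by
  unfold AllianceMinSums
  rw [psums_foldl c.reverse [0] 0 (by simp)]
  simp

lemma psums_length (s : Int) (l : List Int) : (psums s l).length = l.length := by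
  induction l generalizing s with
  | nil => simp [psums]
  | cons x xs ih => simp [psums, ih]

lemma psums_getElem (l : List Int) : ∀ (s : Int) (i : Nat) (h : i < l.length),
    (psums s l)[i]'(by rw [psums_length]; exact h) = s + (l.take (i + 1)).sum := by
  induction l with
  | nil => intro s i h; simp at h
  | cons x xs ih =>
    intro s i h
    cases i with
    | zero => simp [psums]
    | succ j =>
      have hj : j < xs.length := by simpa using h
      simp only [psums, List.getElem_cons_succ, List.take_succ_cons, List.sum_cons]
      rw [ih (s + x) j hj]
      ring

lemma sums_getElem (c : List Int) (m : Nat) (h : m < c.length + 1) :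
    (AllianceMinSums c)[m]'(by rw [sums_eq]; simp [psums_length]; omega)
      = (c.drop (c.length - m)).sum := by
  rcases m with _ | j
  · simp [sums_eq]
  · have hj : j < c.reverse.length := by simpa using Nat.lt_of_succ_lt_succ h
    have : (AllianceMinSums c)[j + 1]'(by rw [sums_eq]; simp [psums_length]; omega)
        = (psums 0 c.reverse)[j]'(by rw [psums_length]; exact hj) := by
      simp [sums_eq]
    rw [this, psums_getElem c.reverse 0 j hj]
    rw [List.take_reverse, List.sum_reverse]
    exact zero_add _

lemma refLoop_eq (c : List Int) (Obj : Int) (m : Nat) (hm : m ≤ c.length)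
    (hsat : Obj ≤ (c.drop (c.length - m)).sum)
    (hmin : ∀ j, j < m → (c.drop (c.length - j)).sum < Obj) :
    ∀ f, c.length - m ≤ f → f ≤ c.length → refLoop c Obj f = maskN c.length (c.length - m) := by
  intro f
  induction f with
  | zero =>
    intro h1 _
    have h0 : c.length - m = 0 := by omega
    rw [h0, refLoop]
  | succ g ih =>
    intro h1 h2
    by_cases he : c.length - m = g + 1
    · simp only [refLoop, ← he, if_neg (not_lt.mpr hsat)]
    · have hgt : c.length - m ≤ g := by omega
      have hj : c.length - (g + 1) < m := by omega
      have hlt := hmin (c.length - (g + 1)) hj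
      have hrw : c.length - (c.length - (g + 1)) = g + 1 := by omega
      rw [hrw] at hlt
      simp only [refLoop, if_pos hlt]
      exact ih hgt (by omega)

lemma sums_len (c : List Int) : (AllianceMinSums c).length = c.length + 1 := by
  rw [sums_eq]
  simp [psums_length]

theorem AllianceMin_spec : Claim_equal_AllianceMin := by
  intro c Obj _ hpre
  unfold Spec_AllianceMin
  obtain ⟨f, hf, hobj⟩ := hpre
  have hidx : c.length - f < (AllianceMinSums c).length := by rw [sums_len]; omega
  have helem : Obj ≤ (AllianceMinSums c)[c.length - f]'hidx := by
    have h1 := sums_getElem c (c.length - f) (by omega)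
    rw [h1]
    have h2 : c.length - (c.length - f) = f := by omega
    rw [h2]
    exact hobj
  have hsome : ∃ m, (AllianceMinSums c).findIdx? (fun t => Obj ≤ t) = some m := by
    cases h : (AllianceMinSums c).findIdx? (fun t => Obj ≤ t) with
    | some m => exact ⟨m, rfl⟩
    | none =>
      exfalso
      have hall := List.findIdx?_eq_none_iff.mp h
      have := hall _ (List.getElem_mem hidx)

      exact absurd helem (by simpa using this)
  obtain ⟨m, hm⟩ := hsome
  obtain ⟨hmlt, hpm, hprev⟩ := List.findIdx?_eq_some_iff_getElem.mp hm
  have hm_le : m ≤ c.length := by rw [sums_len] at hmlt; omega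
  have hsat : Obj ≤ (c.drop (c.length - m)).sum := by
    have h1 := sums_getElem c m (by omega)
    rw [h1] at hpm
    simpa using hpm
  have hmin : ∀ j, j < m → (c.drop (c.length - j)).sum < Obj := by
    intro j hj
    have h2 := hprev j hj
    have h1 := sums_getElem c j (by omega)
    rw [h1] at h2
    simpa using h2
  have hA : AllianceMin c Obj = refLoop c Obj c.length := by
    unfold AllianceMin
    have h0 : (0 : Int) = (c.drop c.length).sum := by simp
    rw [← maskN_self c.length, h0]
    exact aLoop_eq_ref c Obj c.length le_rfl
  rw [hA, refLoop_eq c Obj m hm_le hsat hmin c.length (by omega) le_rfl]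
  unfold AllianceMin_alt
  rw [hm]
  unfold maskN
  show (List.range c.length).map (fun i => decide (c.length - m ≤ i))
      = (List.range c.length).map (fun (i : Nat) => decide ((c.length : Int) - (m : Int) ≤ (i : Int)))
  apply List.map_congr_left
  intro i _
  exact decide_eq_decide.mpr (by omega)
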